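-- pv_equiv track=rewrite | github.com/gabrielima7/OmniAGI | omniagi/transfer/domain_adapter.py | _abstract_knowledge
-- ===== SOURCE A (Python) =====
-- def _abstract_knowledge(knowledge: str) -> str:
--     """Abstract knowledge to general form."""
--     # Replace specific terms with placeholders
--     abstract = knowledge
--     replacements = [
--         ("is a", "ISA"),
--         ("has", "HAS"),
--         ("can", "CAN"),
--     ]
--     for old, new in replacements:
--         abstract = abstract.replace(old, new)
--     return abstract
-- ===== SOURCE B (Python) =====
-- def _abstract_knowledge(knowledge: str) -> str:
--     """Abstract knowledge to general form."""
--     # One left-to-right scan instead of three sequential full-string replace passes.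
--     out = []
--     i = 0
--     n = len(knowledge)
--     while i < n:
--         if knowledge.startswith("is a", i):
--             out.append("ISA")
--             i += 4
--         elif knowledge.startswith("has", i):
--             out.append("HAS")
--             i += 3
--         elif knowledge.startswith("can", i):
--             out.append("CAN")
--             i += 3
--         else:
--             out.append(knowledge[i])
--             i += 1
--     return "".join(out)
-- ===== Notes on version B (the rewrite author's own statement) =====
-- stated objective: alternative
-- what changed: B makes a single left-to-right scan matching the three literals at each position and emitting the placeholder or the character, instead of A's three sequential full-string replace passes; equivalence rests on the patterns never overlapping and the uppercase replacements never creating new matches.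
import Mathlib
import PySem

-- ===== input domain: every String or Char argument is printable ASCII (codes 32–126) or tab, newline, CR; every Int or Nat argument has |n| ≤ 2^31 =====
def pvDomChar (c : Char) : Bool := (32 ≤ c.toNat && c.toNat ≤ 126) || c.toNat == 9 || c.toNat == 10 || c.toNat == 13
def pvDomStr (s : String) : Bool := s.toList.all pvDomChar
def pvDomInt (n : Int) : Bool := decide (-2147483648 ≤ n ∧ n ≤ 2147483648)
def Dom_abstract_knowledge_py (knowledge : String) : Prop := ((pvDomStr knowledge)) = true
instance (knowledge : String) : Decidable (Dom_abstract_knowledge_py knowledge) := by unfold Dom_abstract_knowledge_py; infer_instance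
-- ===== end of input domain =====

set_option maxRecDepth 4000


-- B replaces A's three sequential str.replace passes by one left-to-right scan; same result, different traversal.

-- ===== PORT A =====
def abstract_knowledge_py (knowledge : String) : String :=
  let replacements : List (String × String) := [("is a", "ISA"), ("has", "HAS"), ("can", "CAN")]
  replacements.foldl (fun abstract p => PySem.Str.replace abstract p.1 p.2) knowledge

-- ===== PORT B =====
-- the scan of Source B: at each position try "is a", "has", "can", else copy the character
def pvScan : List Char → List Char
  | [] => []
  | c :: t =>
    if ['i', 's', ' ', 'a'].isPrefixOf (c :: t) then 'I' :: 'S' :: 'A' :: pvScan (t.drop 3)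
    else if ['h', 'a', 's'].isPrefixOf (c :: t) then 'H' :: 'A' :: 'S' :: pvScan (t.drop 2)
    else if ['c', 'a', 'n'].isPrefixOf (c :: t) then 'C' :: 'A' :: 'N' :: pvScan (t.drop 2)
    else c :: pvScan t
  termination_by l => l.length
  decreasing_by all_goals simp

def abstract_knowledge_py_alt (knowledge : String) : String :=
  String.ofList (pvScan knowledge.toList)

-- ===== PRECONDITION & SPEC =====
def Spec_abstract_knowledge_py (knowledge : String) (out : String) : Prop := out = abstract_knowledge_py_alt knowledge
instance (knowledge : String) (out : String) : Decidable (Spec_abstract_knowledge_py knowledge out) := by unfold Spec_abstract_knowledge_py; infer_instance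

-- ===== CLAIM (what is proved, stated in full; the proofs are below) =====
def Claim_equal_abstract_knowledge_py : Prop := ∀ (knowledge : String), Dom_abstract_knowledge_py knowledge → Spec_abstract_knowledge_py knowledge (abstract_knowledge_py knowledge)

-- ===== LEMMAS AND PROOFS =====

-- a non-accumulator reformulation of PySem.Chars.replace (for old ≠ [])
def pvRep (old new : List Char) : List Char → List Char
  | [] => []
  | c :: t =>
    if old.isPrefixOf (c :: t) then new ++ pvRep old new (t.drop (old.length - 1))
    else c :: pvRep old new t
  termination_by l => l.length
  decreasing_by all_goals simp

theorem pvRep_cons_pos (old new : List Char) (c : Char) (t : List Char)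
    (h : old.isPrefixOf (c :: t) = true) :
    pvRep old new (c :: t) = new ++ pvRep old new (t.drop (old.length - 1)) := by
  rw [pvRep]; simp [h]

theorem pvRep_cons_neg (old new : List Char) (c : Char) (t : List Char)
    (h : ¬ old.isPrefixOf (c :: t) = true) :
    pvRep old new (c :: t) = c :: pvRep old new t := by
  rw [pvRep]; simp [h]

theorem pvGo_acc (old new : List Char) :
    ∀ (fuel : Nat) (l acc : List Char),
      PySem.Chars.replace.go old new fuel l acc = acc.reverse ++ PySem.Chars.replace.go old new fuel l [] := by
  intro fuel
  induction fuel with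
  | zero => intro l acc; simp [PySem.Chars.replace.go.eq_1]
  | succ fuel ih =>
    intro l acc
    cases l with
    | nil => simp [PySem.Chars.replace.go.eq_def]
    | cons c t =>
      rw [PySem.Chars.replace.go.eq_def old new (fuel + 1) (c :: t) acc]
      rw [PySem.Chars.replace.go.eq_def old new (fuel + 1) (c :: t) []]
      by_cases h : old.isPrefixOf (c :: t) = true
      · simp only [h, if_pos]
        rw [ih _ (new.reverse ++ acc), ih _ (new.reverse ++ [])]
        simp
      · simp only [h]
        rw [ih t (c :: acc), ih t [c]]
        simp

theorem pvGo_eq_pvRep (old new : List Char) (hold : old ≠ []) :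
    ∀ (fuel : Nat) (l : List Char), l.length ≤ fuel →
      PySem.Chars.replace.go old new fuel l [] = pvRep old new l := by
  intro fuel
  induction fuel with
  | zero =>
    intro l hl
    have : l = [] := List.eq_nil_of_length_eq_zero (Nat.le_zero.mp hl)
    subst this
    simp [PySem.Chars.replace.go.eq_1, pvRep]
  | succ fuel ih =>
    intro l hl
    cases l with
    | nil => simp [PySem.Chars.replace.go.eq_def, pvRep]
    | cons c t =>
      have hl' : t.length ≤ fuel := by simp at hl; omega
      rw [PySem.Chars.replace.go.eq_def]
      by_cases h : old.isPrefixOf (c :: t) = true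
      · simp only [h, if_pos]
        have hdrop : List.drop old.length (c :: t) = t.drop (old.length - 1) := by
          obtain ⟨k, hk⟩ : ∃ k, old.length = k + 1 :=
            ⟨old.length - 1, by cases old with | nil => exact absurd rfl hold | cons a b => simp⟩
          rw [hk]; simp
        have hlen : (t.drop (old.length - 1)).length ≤ fuel := by
          simp; omega
        rw [pvGo_acc old new fuel _ (new.reverse ++ []), hdrop,
          ih (t.drop (old.length - 1)) hlen, pvRep_cons_pos old new c t h]
        simp
      · simp only [h]
        rw [pvGo_acc old new fuel t [c], ih t hl', pvRep_cons_neg old new c t h]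
        simp

theorem pvReplace_eq_pvRep (old new l : List Char) (hold : old ≠ []) :
    PySem.Chars.replace l old new = pvRep old new l := by
  rw [PySem.Chars.replace]
  simp [List.isEmpty_iff, hold]
  exact pvGo_eq_pvRep old new hold l.length l le_rfl

-- heads that the (uppercase) replacement text cannot produce pass through pvRep
theorem pvPrefix_pres (old new : List Char) (hnew : new ≠ []) (p : List Char)
    (hp : ∀ c ∈ p, c ∉ new) :
    ∀ t, p.isPrefixOf (pvRep old new t) = true → p.isPrefixOf t = true := by
  induction p with
  | nil => intro t _; simp
  | cons c p' ihp =>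
    intro t h
    cases t with
    | nil => rw [pvRep] at h; simp at h
    | cons d r =>
      by_cases hpre : old.isPrefixOf (d :: r) = true
      · rw [pvRep_cons_pos old new d r hpre] at h
        cases new with
        | nil => exact absurd rfl hnew
        | cons m ms =>
          simp at h
          exact absurd (h.1 ▸ List.mem_cons_self) (hp c List.mem_cons_self)
      · rw [pvRep_cons_neg old new d r hpre] at h
        simp at h ⊢
        have h2 : p'.isPrefixOf (pvRep old new r) = true := List.isPrefixOf_iff_prefix.mpr h.2
        exact ⟨h.1, List.isPrefixOf_iff_prefix.mp (ihp (fun x hx => hp x (List.mem_cons_of_mem c hx)) r h2)⟩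

theorem pvMain : ∀ l : List Char,
    pvRep ['c','a','n'] ['C','A','N'] (pvRep ['h','a','s'] ['H','A','S'] (pvRep ['i','s',' ','a'] ['I','S','A'] l)) = pvScan l := by
  intro l
  induction l using pvScan.induct with
  | case1 =>
    rw [pvScan, pvRep, pvRep, pvRep]
  | case2 c t h ih =>
    obtain ⟨u, hu⟩ := List.isPrefixOf_iff_prefix.mp h
    injection hu with hc ht
    subst hc; subst ht
    rw [pvRep_cons_pos _ _ _ _ (by simp [List.isPrefixOf])]
    simp only [List.length_cons, List.length_nil, show (4 - 1 : Nat) = 3 from rfl,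
      List.cons_append, List.nil_append]
    rw [pvRep_cons_neg ['h','a','s'] _ 'I' _ (by simp [List.isPrefixOf]),
      pvRep_cons_neg ['h','a','s'] _ 'S' _ (by simp [List.isPrefixOf]),
      pvRep_cons_neg ['h','a','s'] _ 'A' _ (by simp [List.isPrefixOf]),
      pvRep_cons_neg ['c','a','n'] _ 'I' _ (by simp [List.isPrefixOf]),
      pvRep_cons_neg ['c','a','n'] _ 'S' _ (by simp [List.isPrefixOf]),
      pvRep_cons_neg ['c','a','n'] _ 'A' _ (by simp [List.isPrefixOf])]
    rw [pvScan]
    simp only [List.isPrefixOf, Char.reduceBEq, Bool.true_and]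
    simp [List.isPrefixOf]
    simpa using ih
  | case3 c t h1 h2 ih =>
    obtain ⟨u, hu⟩ := List.isPrefixOf_iff_prefix.mp h2
    injection hu with hc ht
    subst hc; subst ht
    simp only [List.append_eq, List.cons_append, List.nil_append] at ih ⊢
    rw [pvRep_cons_neg ['i','s',' ','a'] _ 'h' _ (by simp [List.isPrefixOf]),
      pvRep_cons_neg ['i','s',' ','a'] _ 'a' _ (by simp [List.isPrefixOf]),
      pvRep_cons_neg ['i','s',' ','a'] _ 's' _ (by simp [List.isPrefixOf]),
      pvRep_cons_pos ['h','a','s'] _ 'h' _ (by simp [List.isPrefixOf])]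
    simp only [List.length_cons, List.length_nil, show (3 - 1 : Nat) = 2 from rfl,
      List.drop_succ_cons, List.drop_zero, List.cons_append, List.nil_append]
    rw [pvRep_cons_neg ['c','a','n'] _ 'H' _ (by simp [List.isPrefixOf]),
      pvRep_cons_neg ['c','a','n'] _ 'A' _ (by simp [List.isPrefixOf]),
      pvRep_cons_neg ['c','a','n'] _ 'S' _ (by simp [List.isPrefixOf])]
    rw [pvScan]
    simp [List.isPrefixOf]
    simpa using ih
  | case4 c t h1 h2 h3 ih =>
    obtain ⟨u, hu⟩ := List.isPrefixOf_iff_prefix.mp h3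
    injection hu with hc ht
    subst hc; subst ht
    simp only [List.append_eq, List.cons_append, List.nil_append] at ih ⊢
    rw [pvRep_cons_neg ['i','s',' ','a'] _ 'c' _ (by simp [List.isPrefixOf]),
      pvRep_cons_neg ['i','s',' ','a'] _ 'a' _ (by simp [List.isPrefixOf]),
      pvRep_cons_neg ['i','s',' ','a'] _ 'n' _ (by simp [List.isPrefixOf]),
      pvRep_cons_neg ['h','a','s'] _ 'c' _ (by simp [List.isPrefixOf]),
      pvRep_cons_neg ['h','a','s'] _ 'a' _ (by simp [List.isPrefixOf]),
      pvRep_cons_neg ['h','a','s'] _ 'n' _ (by simp [List.isPrefixOf]),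
      pvRep_cons_pos ['c','a','n'] _ 'c' _ (by simp [List.isPrefixOf])]
    simp only [List.length_cons, List.length_nil, show (3 - 1 : Nat) = 2 from rfl,
      List.drop_succ_cons, List.drop_zero, List.cons_append, List.nil_append]
    rw [pvScan]
    simp [List.isPrefixOf]
    simpa using ih
  | case5 c t h1 h2 h3 ih =>
    rw [pvRep_cons_neg _ _ _ _ h1]
    have hhas : ¬ (['h','a','s'] : List Char).isPrefixOf (c :: pvRep ['i','s',' ','a'] ['I','S','A'] t) = true := by
      intro hcon
      simp [List.isPrefixOf] at hcon
      obtain ⟨hc, hpre⟩ := hcon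
      subst hc
      have hast : (['a','s'] : List Char).isPrefixOf t = true := by
        apply pvPrefix_pres ['i','s',' ','a'] ['I','S','A'] (by simp) ['a','s'] (by simp) t
        exact List.isPrefixOf_iff_prefix.mpr hpre
      obtain ⟨v, hv⟩ := List.isPrefixOf_iff_prefix.mp hast
      exact h2 (List.isPrefixOf_iff_prefix.mpr ⟨v, by
        rw [show (['h','a','s'] : List Char) ++ v = 'h' :: (['a','s'] ++ v) from rfl, hv]⟩)
    rw [pvRep_cons_neg _ _ _ _ hhas]
    have hcan : ¬ (['c','a','n'] : List Char).isPrefixOf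
        (c :: pvRep ['h','a','s'] ['H','A','S'] (pvRep ['i','s',' ','a'] ['I','S','A'] t)) = true := by
      intro hcon
      simp [List.isPrefixOf] at hcon
      obtain ⟨hc, hpre⟩ := hcon
      subst hc
      have step1 : (['a','n'] : List Char).isPrefixOf (pvRep ['i','s',' ','a'] ['I','S','A'] t) = true := by
        apply pvPrefix_pres ['h','a','s'] ['H','A','S'] (by simp) ['a','n'] (by simp)
        exact List.isPrefixOf_iff_prefix.mpr hpre
      have step2 : (['a','n'] : List Char).isPrefixOf t = true := by
        apply pvPrefix_pres ['i','s',' ','a'] ['I','S','A'] (by simp) ['a','n'] (by simp)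
        exact step1
      obtain ⟨v, hv⟩ := List.isPrefixOf_iff_prefix.mp step2
      exact h3 (List.isPrefixOf_iff_prefix.mpr ⟨v, by
        rw [show (['c','a','n'] : List Char) ++ v = 'c' :: (['a','n'] ++ v) from rfl, hv]⟩)
    rw [pvRep_cons_neg _ _ _ _ hcan]
    rw [pvScan]
    simp [h1, h2, h3, ih]

-- ===== VERDICT (by name: the statement is the Claim_ definition above) =====
theorem abstract_knowledge_py_spec : Claim_equal_abstract_knowledge_py := by
  intro knowledge _
  unfold Spec_abstract_knowledge_py abstract_knowledge_py abstract_knowledge_py_alt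
  simp only [List.foldl]
  rw [PySem.Str.replace, PySem.Str.replace, PySem.Str.replace]
  apply congrArg String.ofList
  rw [String.toList_ofList, String.toList_ofList]
  rw [pvReplace_eq_pvRep _ _ _ (by decide), pvReplace_eq_pvRep _ _ _ (by decide),
    pvReplace_eq_pvRep _ _ _ (by decide)]
  rw [show "is a".toList = ['i','s',' ','a'] from rfl, show "ISA".toList = ['I','S','A'] from rfl,
    show "has".toList = ['h','a','s'] from rfl, show "HAS".toList = ['H','A','S'] from rfl,
    show "can".toList = ['c','a','n'] from rfl, show "CAN".toList = ['C','A','N'] from rfl]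
  exact pvMain knowledge.toList
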